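-- pv_equiv track=rewrite | github.com/AyatoKinkori/nand2tetris | JackAnalyzer.py | _word_split_tokens
-- ===== SOURCE A (Python) =====
-- SYMBOLS = ["{", "}", "(", ")", "[", "]", ".", ",", ";", "+", "-", "*", "/", "&", "|", "<", ">", "=", "~"]
--
-- def _word_split_tokens(word):
--     tokens = []
--     w2 = ""
--     for w in word:
--         if w in SYMBOLS:
--             if len(w2) > 0:
--                 tokens.append(w2)
--                 w2 = ""
--             tokens.append(w)
--             continue
--         else:
--             w2 += w
--     if len(w2) > 0:
--         tokens.append(w2)
--     return tokens
-- ===== SOURCE B (Python) =====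
-- SYMBOLS = ["{", "}", "(", ")", "[", "]", ".", ",", ";", "+", "-", "*", "/", "&", "|", "<", ">", "=", "~"]
--
-- def _word_split_tokens(word):
--     tokens = []
--     i = 0
--     n = len(word)
--     while i < n:
--         if word[i] in SYMBOLS:
--             tokens.append(word[i])
--             i += 1
--         else:
--             j = i
--             while j < n and word[j] not in SYMBOLS:
--                 j += 1
--             tokens.append(word[i:j])
--             i = j
--     return tokens
-- ===== Notes on version B (the rewrite author's own statement) =====
-- stated objective: alternative
-- what changed: Replaces the flush-on-symbol accumulator loop with a run-based scan: each symbol is emitted directly and each maximal run of non-symbol characters is sliced out in one step, with no pending-buffer state.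
import Mathlib
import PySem

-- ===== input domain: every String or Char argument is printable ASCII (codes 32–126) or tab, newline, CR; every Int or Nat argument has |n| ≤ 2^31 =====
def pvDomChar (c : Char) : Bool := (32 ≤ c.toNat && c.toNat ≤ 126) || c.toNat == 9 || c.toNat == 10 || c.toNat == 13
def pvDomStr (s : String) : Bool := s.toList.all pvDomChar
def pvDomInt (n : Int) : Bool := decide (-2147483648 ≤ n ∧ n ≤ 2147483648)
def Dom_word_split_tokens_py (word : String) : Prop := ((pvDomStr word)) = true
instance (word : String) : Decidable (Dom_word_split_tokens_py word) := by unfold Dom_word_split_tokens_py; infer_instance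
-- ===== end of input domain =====

-- B replaces A's flush-on-symbol accumulator loop with a run-based scan (symbols emitted
-- singly, maximal non-symbol runs sliced out whole); same cost, no pending-buffer state.

-- ===== PORT A =====
-- the module constant SYMBOLS
def pvSymbols : List Char :=
  ['{', '}', '(', ')', '[', ']', '.', ',', ';', '+', '-', '*', '/', '&', '|', '<', '>', '=', '~']

-- the loop body of A: state is (tokens, w2)
def pvStepA (st : List String × List Char) (w : Char) : List String × List Char :=
  if pvSymbols.contains w then
    ((if st.2.length > 0 then st.1 ++ [String.ofList st.2] else st.1) ++ [String.ofList [w]], [])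
  else (st.1, st.2 ++ [w])

def word_split_tokens_py (word : String) : List String :=
  let st := word.toList.foldl pvStepA ([], [])
  if st.2.length > 0 then st.1 ++ [String.ofList st.2] else st.1

-- ===== PORT B =====
-- B's outer while loop: either emit one symbol, or slice out the maximal non-symbol run
def pvRuns : List Char → List String
  | [] => []
  | c :: cs =>
    if h : pvSymbols.contains c then
      String.ofList [c] :: pvRuns cs
    else
      String.ofList ((c :: cs).takeWhile (fun d => !pvSymbols.contains d)) ::
        pvRuns ((c :: cs).dropWhile (fun d => !pvSymbols.contains d))
  termination_by l => l.length
  decreasing_by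
    · simp
    · simp only [List.dropWhile]
      have hc : (!pvSymbols.contains c) = true := by simpa using h
      rw [hc]
      exact Nat.lt_succ_of_le (List.length_dropWhile_le _ _)

def word_split_tokens_py_alt (word : String) : List String := pvRuns word.toList

-- ===== PRECONDITION & SPEC =====
def Spec_word_split_tokens_py (word : String) (out : List String) : Prop := out = word_split_tokens_py_alt word
instance (word : String) (out : List String) : Decidable (Spec_word_split_tokens_py word out) := by unfold Spec_word_split_tokens_py; infer_instance

-- ===== CLAIM (what is proved, stated in full; the proofs are below) =====
def Claim_equal_word_split_tokens_py : Prop := ∀ (word : String), Dom_word_split_tokens_py word → Spec_word_split_tokens_py word (word_split_tokens_py word)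

-- ===== LEMMAS AND PROOFS =====

-- a run of non-symbols followed by [] or a symbol: takeWhile keeps the run, dropWhile leaves the rest
lemma pv_take_drop (w2 rest : List Char) (h : ∀ c ∈ w2, c ∉ pvSymbols)
    (hr : rest = [] ∨ ∃ d ds, rest = d :: ds ∧ d ∈ pvSymbols) :
    (w2 ++ rest).takeWhile (fun d => !pvSymbols.contains d) = w2 ∧
    (w2 ++ rest).dropWhile (fun d => !pvSymbols.contains d) = rest := by
  induction w2 with
  | nil =>
    rcases hr with h0 | ⟨d, ds, rfl, hd⟩
    · simp [h0]
    · simp [List.takeWhile, List.dropWhile, hd]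
  | cons a as ih =>
    have ha : a ∉ pvSymbols := h a (by simp)
    have hrec := ih (fun c hc => h c (by simp [hc]))
    constructor
    · rw [List.cons_append, List.takeWhile_cons_of_pos (by simp [ha]), hrec.1]
    · rw [List.cons_append, List.dropWhile_cons_of_pos (by simp [ha])]
      exact hrec.2

-- pvRuns on (run ++ rest) with rest empty or symbol-headed
lemma pvRuns_run_append (w2 rest : List Char) (h : ∀ c ∈ w2, c ∉ pvSymbols)
    (hr : rest = [] ∨ ∃ d ds, rest = d :: ds ∧ d ∈ pvSymbols) :
    pvRuns (w2 ++ rest) = (if w2.length > 0 then [String.ofList w2] else []) ++ pvRuns rest := by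
  cases w2 with
  | nil => simp
  | cons a as =>
    have ha : a ∉ pvSymbols := h a (by simp)
    have htd := pv_take_drop (a :: as) rest h hr
    rw [show ((a :: as) ++ rest) = a :: (as ++ rest) by simp]
    rw [pvRuns, dif_neg (show ¬ pvSymbols.contains a = true by simpa using ha)]
    rw [show a :: (as ++ rest) = (a :: as) ++ rest by simp, htd.1, htd.2]
    simp

-- loop invariant: flushing after folding the rest equals tokens-so-far ++ runs of (pending ++ rest)
lemma pv_loop_inv (l : List Char) : ∀ (ts : List String) (w2 : List Char),
    (∀ c ∈ w2, c ∉ pvSymbols) →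
    (let st := l.foldl pvStepA (ts, w2)
     if st.2.length > 0 then st.1 ++ [String.ofList st.2] else st.1) = ts ++ pvRuns (w2 ++ l) := by
  induction l with
  | nil =>
    intro ts w2 h
    have hw := pvRuns_run_append w2 [] h (Or.inl rfl)
    simp only [List.append_nil] at hw
    simp only [List.foldl_nil, List.append_nil]
    rw [hw, show pvRuns [] = [] from by simp [pvRuns]]
    cases w2 <;> simp
  | cons c cs ih =>
    intro ts w2 h
    by_cases hc : c ∈ pvSymbols
    · have hstep : pvStepA (ts, w2) c =
        ((if w2.length > 0 then ts ++ [String.ofList w2] else ts) ++ [String.ofList [c]], []) := by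
        simp [pvStepA, hc]
      rw [List.foldl_cons, hstep, ih _ [] (by simp)]
      have hsplit := pvRuns_run_append w2 (c :: cs) h (Or.inr ⟨c, cs, rfl, hc⟩)
      rw [hsplit, pvRuns, dif_pos (show pvSymbols.contains c = true by simpa using hc)]
      cases w2 <;> simp
    · have hstep : pvStepA (ts, w2) c = (ts, w2 ++ [c]) := by simp [pvStepA, hc]
      rw [List.foldl_cons, hstep,
        ih ts (w2 ++ [c]) (by intro x hx; rcases List.mem_append.1 hx with h1 | h1
                              · exact h x h1
                              · simp at h1; simpa [h1] using hc)]
      rw [List.append_assoc, List.singleton_append]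

-- ===== VERDICT (by name: the statement is the Claim_ definition above) =====
theorem word_split_tokens_py_spec : Claim_equal_word_split_tokens_py := by
  intro word _
  show word_split_tokens_py word = word_split_tokens_py_alt word
  have := pv_loop_inv word.toList [] [] (by simp)
  simpa [word_split_tokens_py, word_split_tokens_py_alt] using this
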